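-- pv_equiv track=rewrite | github.com/jhsul51/baekjoon_recursion | 2447.py | upstar
-- ===== SOURCE A (Python) =====
-- def upstar(star):
--     newstar = list()
--     for i in range(3*len(star)):
--         if i//len(star) == 1:
--             newstar.append(star[i%len(star)]+' '*len(star)+star[i%len(star)])
--         else:
--             newstar.append(star[i%len(star)]*3)
--     return newstar
-- ===== SOURCE B (Python) =====
-- def upstar(star):
--     outer = [s * 3 for s in star]
--     middle = [s + ' ' * len(star) + s for s in star]
--     return outer + middle + outer
-- ===== Notes on version B (the rewrite author's own statement) =====
-- stated objective: simpler
-- what changed: Replaced the single branchy loop over range(3*len(star)) with its i//n test and i%n indexing by three direct comprehensions over star (outer, middle, outer) concatenated.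
import Mathlib
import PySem

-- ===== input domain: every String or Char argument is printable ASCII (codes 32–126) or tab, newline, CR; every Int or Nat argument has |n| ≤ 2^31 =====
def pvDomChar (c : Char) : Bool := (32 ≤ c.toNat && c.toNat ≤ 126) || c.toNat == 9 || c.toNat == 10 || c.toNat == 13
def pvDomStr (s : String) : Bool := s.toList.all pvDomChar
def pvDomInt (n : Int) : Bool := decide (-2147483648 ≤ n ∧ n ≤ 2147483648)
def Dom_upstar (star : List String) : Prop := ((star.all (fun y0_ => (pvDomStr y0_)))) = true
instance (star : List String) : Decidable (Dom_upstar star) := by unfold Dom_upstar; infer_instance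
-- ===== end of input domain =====

-- B replaces A's single loop over range(3*len(star)) with its i//n branch and i%n
-- indexing by three direct passes over star (outer + middle + outer); objective: simpler.

-- ===== PORT A =====
-- star[i % len(star)] (index always in range inside the loop: 0 ≤ i%n < n)
def upstarGet (star : List String) (i : Int) : String :=
  PySem.List.pyGetD star (PySem.Int.mod i (star.length : Int)) ""

def upstar (star : List String) : List String :=
  (PySem.List.pyRange 0 (3 * (star.length : Int)) 1).foldl
    (fun newstar i =>
      if PySem.Int.floordiv i (star.length : Int) = 1 then
        newstar ++ [String.ofList ((upstarGet star i).toList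
                      ++ PySem.List.pyRepeat [' '] (star.length : Int)
                      ++ (upstarGet star i).toList)]
      else
        newstar ++ [String.ofList (PySem.List.pyRepeat (upstarGet star i).toList 3)]) []

-- ===== PORT B =====
def upstar_alt (star : List String) : List String :=
  let outer := star.map (fun s => String.ofList (PySem.List.pyRepeat s.toList 3))
  let middle := star.map (fun s =>
    String.ofList (s.toList ++ PySem.List.pyRepeat [' '] (star.length : Int) ++ s.toList))
  outer ++ middle ++ outer

-- ===== PRECONDITION & SPEC =====
def Spec_upstar (star : List String) (out : List String) : Prop := out = upstar_alt star
instance (star : List String) (out : List String) : Decidable (Spec_upstar star out) := by unfold Spec_upstar; infer_instance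

-- ===== CLAIM (what is proved, stated in full; the proofs are below) =====
def Claim_equal_upstar : Prop := ∀ (star : List String), Dom_upstar star → Spec_upstar star (upstar star)

-- ===== LEMMAS AND PROOFS =====

-- the string A appends at loop index i (A's loop body value)
def upstarBody (star : List String) (i : Int) : String :=
  if PySem.Int.floordiv i (star.length : Int) = 1 then
    String.ofList ((upstarGet star i).toList
      ++ PySem.List.pyRepeat [' '] (star.length : Int)
      ++ (upstarGet star i).toList)
  else
    String.ofList (PySem.List.pyRepeat (upstarGet star i).toList 3)

lemma upstar_eq_map (star : List String) :
    upstar star = (PySem.List.pyRange 0 (3 * (star.length : Int)) 1).map (upstarBody star) := by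
  unfold upstar
  rw [show (fun (newstar : List String) (i : Int) =>
      if PySem.Int.floordiv i (star.length : Int) = 1 then
        newstar ++ [String.ofList ((upstarGet star i).toList
                      ++ PySem.List.pyRepeat [' '] (star.length : Int)
                      ++ (upstarGet star i).toList)]
      else
        newstar ++ [String.ofList (PySem.List.pyRepeat (upstarGet star i).toList 3)])
      = (fun (newstar : List String) (i : Int) => newstar ++ [upstarBody star i]) from by
        funext a i; unfold upstarBody; split <;> rfl]
  exact PySem.List.foldl_append_singleton_eq_map (upstarBody star) _ []

lemma upstarBody_at (star : List String) (hn : star ≠ []) (k j : Nat) (hj : j < star.length) :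
    upstarBody star ((k * star.length : Nat) + (j : Int)) =
      (if (k : Int) = 1 then
        String.ofList (star[j].toList ++ PySem.List.pyRepeat [' '] (star.length : Int) ++ star[j].toList)
      else String.ofList (PySem.List.pyRepeat star[j].toList 3)) := by
  have hnpos : 0 < (star.length : Int) := by
    have := List.length_pos_iff.mpr hn; exact_mod_cast this
  have hfd : PySem.Int.floordiv ((k * star.length : Nat) + (j : Int)) (star.length : Int) = (k : Int) := by
    rw [PySem.Int.floordiv_eq_iff_of_pos hnpos]
    push_cast
    constructor <;> nlinarith [Int.natCast_nonneg j, (show (j : Int) < (star.length : Int) by exact_mod_cast hj)]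
  have hmd : PySem.Int.mod ((k * star.length : Nat) + (j : Int)) (star.length : Int) = (j : Int) := by
    rw [PySem.Int.mod_eq_emod_of_pos hnpos]
    push_cast
    rw [add_comm, mul_comm, Int.add_mul_emod_self_left]
    exact Int.emod_eq_of_lt (by positivity) (by exact_mod_cast hj)
  have hget : upstarGet star ((k * star.length : Nat) + (j : Int)) = star[j] := by
    unfold upstarGet
    rw [hmd, PySem.List.pyGetD_natCast]
    simp [List.getD, hj]
  unfold upstarBody
  rw [hfd, hget]

lemma segment_eq (star : List String) (hn : star ≠ []) (k : Nat) :
    (PySem.List.pyRange ((k * star.length : Nat) : Int) ((k * star.length + star.length : Nat) : Int) 1).map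
      (upstarBody star)
      = (if (k : Int) = 1 then
          star.map (fun s => String.ofList (s.toList ++ PySem.List.pyRepeat [' '] (star.length : Int) ++ s.toList))
        else star.map (fun s => String.ofList (PySem.List.pyRepeat s.toList 3))) := by
  rw [PySem.List.pyRange_one, List.map_map]
  have hlen : (((k * star.length + star.length : Nat) : Int) - ((k * star.length : Nat) : Int)).toNat = star.length := by
    push_cast; omega
  rw [hlen]
  split
  · apply List.ext_getElem (by simp)
    intro j h1 h2
    simp only [List.getElem_map, List.getElem_range, Function.comp]
    have hj : j < star.length := by simpa using h2
    rw [upstarBody_at star hn k j hj]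
    simp_all
  · apply List.ext_getElem (by simp)
    intro j h1 h2
    simp only [List.getElem_map, List.getElem_range, Function.comp]
    have hj : j < star.length := by simpa using h2
    rw [upstarBody_at star hn k j hj]
    simp_all

-- ===== VERDICT (by name: the statement is the Claim_ definition above) =====
theorem upstar_spec : Claim_equal_upstar := by
  intro star _
  unfold Spec_upstar upstar_alt
  rcases eq_or_ne star [] with h | h
  · subst h; rfl
  rw [upstar_eq_map]
  have hnpos : 0 < star.length := List.length_pos_iff.mpr h
  have h1 : ((star.length : Nat) : Int) ≤ ((2 * star.length : Nat) : Int) := by push_cast; omega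
  have h0 : (0 : Int) ≤ ((star.length : Nat) : Int) := by positivity
  have h2 : ((2 * star.length : Nat) : Int) ≤ 3 * (star.length : Int) := by push_cast; omega
  rw [show (3 * (star.length : Int)) = ((3 * star.length : Nat) : Int) by push_cast; ring]
  rw [PySem.List.pyRange_one_append 0 ((star.length : Nat) : Int) _ h0 (by push_cast; omega),
      PySem.List.pyRange_one_append ((star.length : Nat) : Int) ((2 * star.length : Nat) : Int) _ h1 (by push_cast; omega)]
  rw [List.map_append, List.map_append]
  have s0 := segment_eq star h 0
  have s1 := segment_eq star h 1
  have s2 := segment_eq star h 2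
  simp only [Nat.zero_mul, Nat.one_mul, Nat.cast_zero] at s0 s1 s2
  rw [show ((0:Nat) + star.length) = star.length by omega] at s0
  rw [show (star.length + star.length) = 2 * star.length by omega] at s1
  rw [show (2 * star.length + star.length) = 3 * star.length by omega] at s2
  norm_num at s0 s1 s2
  push_cast at s0 s1 s2 ⊢
  simp only [PySem.List.pyRepeat_singleton, Int.toNat_natCast]
  rw [s0, s1, s2]
  simp [List.append_assoc]
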